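-- pv_equiv track=rewrite | github.com/madfalc0n/my_coding_labs | algorithm/programmers/regular_test/9/q3.py | solution
-- ===== SOURCE A (Python) =====
-- def solution(a):
--     if len(a) == 1:
--         answer=1
--     answer=2
--     bool_T = [False] * len(a)
--     L_start = a[0]
--     for i in range(1,len(a)-1):
--         if a[i] < L_start:
--             L_start = a[i]
--             answer+=1
--             bool_T[i]=True
--
--     R_start = a[-1]
--     for i in range(len(a)-1,-1,-1):
--         if a[i] < R_start:
--             R_start = a[i]
--             if bool_T[i]: continue
--             answer+=1
--             bool_T[i]=True
--
--     return answer
-- ===== SOURCE B (Python) =====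
-- def solution(a):
--     n = len(a)
--     count = 0
--     for i in range(n - 1):
--         if (i >= 1 and a[i] < min(a[:i])) or a[i] < min(a[i + 1:]):
--             count += 1
--     return 2 + count
-- ===== Notes on version B (the rewrite author's own statement) =====
-- stated objective: simpler
-- what changed: Replaces A's two stateful running-minimum scans with a mutated boolean flag array and continue-based deduplication by a single loop that tests each index directly against the minimum of its prefix slice and of its suffix slice (naive recomputation, no running state, no flags).
import Mathlib
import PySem

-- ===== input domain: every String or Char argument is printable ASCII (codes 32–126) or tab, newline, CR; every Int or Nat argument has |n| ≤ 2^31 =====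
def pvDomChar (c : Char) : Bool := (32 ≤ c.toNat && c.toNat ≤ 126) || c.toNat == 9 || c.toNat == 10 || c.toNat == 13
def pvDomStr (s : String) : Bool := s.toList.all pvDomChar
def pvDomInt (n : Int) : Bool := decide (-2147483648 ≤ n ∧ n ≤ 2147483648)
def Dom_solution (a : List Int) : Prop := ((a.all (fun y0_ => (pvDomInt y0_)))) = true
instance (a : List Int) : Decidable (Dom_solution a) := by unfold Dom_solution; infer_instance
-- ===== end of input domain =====

-- B replaces A's two stateful running-minimum scans (with a mutated boolean flag array and
-- continue-based dedup) by one loop testing each index against min of its prefix/suffix slice.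

-- ===== PORT A =====
-- body of A's first loop: running left minimum, counting and flagging new minima
def stepL (a : List Int) (st : Int × List Bool × Int) (i : Int) : Int × List Bool × Int :=
  if PySem.List.pyGetD a i 0 < st.2.2 then
    (st.1 + 1, PySem.List.pySetD st.2.1 i true, PySem.List.pyGetD a i 0)
  else st

-- body of A's second loop: running right minimum; 'continue' skips already-flagged indices
def stepR (a : List Int) (st : Int × List Bool × Int) (i : Int) : Int × List Bool × Int :=
  if PySem.List.pyGetD a i 0 < st.2.2 then
    if PySem.List.pyGetD st.2.1 i false then (st.1, st.2.1, PySem.List.pyGetD a i 0)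
    else (st.1 + 1, PySem.List.pySetD st.2.1 i true, PySem.List.pyGetD a i 0)
  else st

def solution (a : List Int) : Int :=
  -- Python's 'if len(a)==1: answer=1' is dead code: answer is unconditionally reassigned to 2
  let answer : Int := 2
  let boolT : List Bool := List.replicate a.length false
  let s1 := (PySem.List.pyRange 1 ((a.length : Int) - 1) 1).foldl (stepL a)
              (answer, boolT, PySem.List.pyGetD a 0 0)
  let s2 := (PySem.List.pyRange ((a.length : Int) - 1) (-1) (-1)).foldl (stepR a)
              (s1.1, s1.2.1, PySem.List.pyGetD a (-1) 0)
  s2.1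

-- ===== PORT B =====
-- Source B: one loop over range(n-1); each index compared against min of its prefix/suffix slice.
-- min(l) for the guaranteed-nonempty slices is (PySem.List.min? l id).getD 0 (none unreachable).
def condB (a : List Int) (i : Nat) : Bool :=
  (decide (1 ≤ i) && decide (a.getD i 0 < (PySem.List.min? (a.take i) (fun x => x)).getD 0))
    || decide (a.getD i 0 < (PySem.List.min? (a.drop (i + 1)) (fun x => x)).getD 0)

def solution_alt (a : List Int) : Int :=
  let n := a.length
  2 + (List.range (n - 1)).foldl (fun c i => if condB a i then c + 1 else c) 0

-- ===== PRECONDITION & SPEC =====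
-- Pre_ excludes only the empty list, on which the Python A raises IndexError reading its first element.
def Pre_solution (a : List Int) : Prop := a ≠ []
instance (a : List Int) : Decidable (Pre_solution a) := by unfold Pre_solution; infer_instance
def pvWitness_solution : List Int := ([3, 1, 4, 1, 5, 0, 2])

def Spec_solution (a : List Int) (out : Int) : Prop := out = solution_alt a
instance (a : List Int) (out : Int) : Decidable (Spec_solution a out) := by unfold Spec_solution; infer_instance

-- ===== CLAIM (what is proved, stated in full; the proofs are below) =====
def Claim_equal_solution : Prop := ∀ (a : List Int), Dom_solution a → Pre_solution a → Spec_solution a (solution a)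

-- ===== LEMMAS AND PROOFS =====

theorem take_drop_succ (a : List Int) (k m : Nat) (h : k + m < a.length) :
    (a.drop k).take (m+1) = (a.drop k).take m ++ [a.getD (k+m) 0] := by
  have hm : m < (a.drop k).length := by simp; omega
  rw [List.take_add_one, List.getElem?_eq_getElem hm]
  simp [List.getElem_drop, List.getElem?_eq_getElem h]

theorem getD_append_bool (l : List Bool) (b : Bool) (t : Nat) (ht : t ≠ l.length ∨ b = false) :
    (l ++ [b]).getD t false = l.getD t false := by
  rcases Nat.lt_trichotomy t l.length with h | h | h
  · simp [List.getD, List.getElem?_append_left h]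
  · rcases ht with ht | rfl
    · omega
    · subst h
      have h2 : l[l.length]? = none := List.getElem?_eq_none (le_refl _)
      simp [List.getD]
  · have h3 : (l ++ [b])[t]? = none := List.getElem?_eq_none (by simp; omega)
    have h2 : l[t]? = none := List.getElem?_eq_none (by omega)
    simp [List.getD, h3, h2]

theorem getD_set_self (l : List Bool) (i : Nat) (h : i < l.length) (b : Bool) :
    (l.set i b).getD i false = b := by simp [List.getD, h]

theorem getD_set_ne (l : List Bool) (i j : Nat) (h : i ≠ j) (b : Bool) :
    (l.set i b).getD j false = l.getD j false := by simp [List.getD, List.getElem?_set_ne h]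

def runMin (L : Int) (ys : List Int) : Int := ys.foldl (fun m x => if x < m then x else m) L

-- flags of left-scan style: flag element t iff it beats everything before it (seed m)
def flagsB : Int → List Int → List Bool
  | _, [] => []
  | m, x :: xs => decide (x < m) :: flagsB (if x < m then x else m) xs

theorem runMin_append (L : Int) (ys : List Int) (z : Int) :
    runMin L (ys ++ [z]) = if z < runMin L ys then z else runMin L ys := by
  simp [runMin, List.foldl_append]

theorem flagsB_length (L : Int) (ys : List Int) : (flagsB L ys).length = ys.length := by
  induction ys generalizing L with
  | nil => rfl
  | cons x xs ih => simp [flagsB, ih]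

theorem flagsB_append (L : Int) (ys : List Int) (z : Int) :
    flagsB L (ys ++ [z]) = flagsB L ys ++ [decide (z < runMin L ys)] := by
  induction ys generalizing L with
  | nil => simp [flagsB, runMin]
  | cons x xs ih =>
      simp only [List.cons_append, flagsB, ih, runMin, List.foldl_cons]
      rfl

theorem getD_append_self (l : List Bool) (b : Bool) :
    (l ++ [b]).getD l.length false = b := by
  simp [List.getD]

theorem leftFold (a : List Int) (k m : Nat) (hkm : k + m ≤ a.length)
    (ans L : Int) (bT : List Bool) (hlen : bT.length = a.length) :
    (((PySem.List.pyRange (k : Int) ((k + m : Nat) : Int) 1).foldl (stepL a) (ans, bT, L)).1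
        = ans + ((flagsB L ((a.drop k).take m)).countP id : Int))
    ∧ (((PySem.List.pyRange (k : Int) ((k + m : Nat) : Int) 1).foldl (stepL a) (ans, bT, L)).2.2
        = runMin L ((a.drop k).take m))
    ∧ (((PySem.List.pyRange (k : Int) ((k + m : Nat) : Int) 1).foldl (stepL a) (ans, bT, L)).2.1.length
        = bT.length)
    ∧ (∀ j : Nat,
        ((PySem.List.pyRange (k : Int) ((k + m : Nat) : Int) 1).foldl (stepL a) (ans, bT, L)).2.1.getD j false
          = (bT.getD j false ||
              (decide (k ≤ j) && (flagsB L ((a.drop k).take m)).getD (j - k) false))) := by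
  induction m with
  | zero =>
      rw [PySem.List.pyRange_one_eq_nil (by simp)]
      simp [flagsB, runMin]
  | succ m ih =>
      have hkm' : k + m ≤ a.length := by omega
      have hlt : k + m < a.length := by omega
      obtain ⟨ih1, ih2, ih3, ih4⟩ := ih hkm'
      have hcast : ((k + (m+1) : Nat) : Int) = ((k + m : Nat) : Int) + 1 := by push_cast; ring
      have hle : (k : Int) ≤ ((k + m : Nat) : Int) := by push_cast; omega
      rw [hcast, PySem.List.pyRange_one_succ_right hle, List.foldl_append, List.foldl_cons,
        List.foldl_nil]
      set res := (PySem.List.pyRange (k : Int) ((k + m : Nat) : Int) 1).foldl (stepL a) (ans, bT, L) with hres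
      have hseg : (a.drop k).take (m+1) = (a.drop k).take m ++ [a.getD (k+m) 0] :=
        take_drop_succ a k m hlt
      have hflen : (flagsB L ((a.drop k).take m)).length = m := by
        rw [flagsB_length]; simp; omega
      rw [hseg, flagsB_append, runMin_append]
      by_cases hc : a.getD (k+m) 0 < runMin L ((a.drop k).take m)
      · have hstep : stepL a res ((k + m : Nat) : Int)
            = (res.1 + 1, res.2.1.set (k+m) true, a.getD (k+m) 0) := by
          simp only [stepL, PySem.List.pyGetD_natCast, PySem.List.pySetD_natCast, ih2, if_pos hc]
        rw [hstep, if_pos hc, decide_eq_true hc]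
        refine ⟨?_, rfl, ?_, ?_⟩
        · show res.1 + 1 = _
          rw [ih1, List.countP_append]; simp; ring
        · show (res.2.1.set (k+m) true).length = bT.length
          simp [ih3]
        · intro j
          show (res.2.1.set (k+m) true).getD j false = _
          by_cases hj : j = k + m
          · subst hj
            rw [getD_set_self _ _ (by rw [ih3, hlen]; omega)]
            have h1 : (k + m) - k = m := by omega
            rw [h1]
            generalize hG : flagsB L ((a.drop k).take m) = fl at hflen
            rw [← hflen, getD_append_self]
            simp
          · rw [getD_set_ne _ _ _ (fun h => hj h.symm), ih4 j]
            by_cases hk : k ≤ j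
            · have hjk : j - k ≠ m := by omega
              rw [getD_append_bool _ _ _ (Or.inl (by rw [hflen]; exact hjk))]
            · simp [hk]
      · have hstep : stepL a res ((k + m : Nat) : Int) = res := by
          simp only [stepL, PySem.List.pyGetD_natCast, ih2, if_neg hc]
        rw [hstep, if_neg hc, decide_eq_false hc]
        refine ⟨?_, ih2, ih3, ?_⟩
        · rw [ih1, List.countP_append]; simp
        · intro j
          rw [ih4 j, getD_append_bool _ _ _ (Or.inr rfl)]

def cntR (a : List Int) (bTL : List Bool) : Nat → Int → Int
  | 0, R => if a.getD 0 0 < R ∧ bTL.getD 0 false = false then 1 else 0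
  | i + 1, R =>
      (if a.getD (i+1) 0 < R ∧ bTL.getD (i+1) false = false then 1 else 0) +
        cntR a bTL i (if a.getD (i+1) 0 < R then a.getD (i+1) 0 else R)

theorem rightFold (a : List Int) (bTL : List Bool) (i : Nat) (hi : i < a.length) :
    ∀ (ans R : Int) (bT : List Bool), bT.length = a.length →
      (∀ j : Nat, j ≤ i → bT.getD j false = bTL.getD j false) →
      ((PySem.List.pyRange (i : Int) (-1) (-1)).foldl (stepR a) (ans, bT, R)).1
        = ans + cntR a bTL i R := by
  induction i with
  | zero =>
      intro ans R bT hlen hagree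
      rw [PySem.List.pyRange_neg_one_cons (by norm_num),
        PySem.List.pyRange_neg_one_eq_nil (by norm_num), List.foldl_cons, List.foldl_nil]
      have hread : PySem.List.pyGetD bT (0 : Int) false = bTL.getD 0 false := by
        have h0 := hagree 0 (le_refl 0)
        simpa [PySem.List.pyGetD_zero] using h0
      simp only [Nat.cast_zero, stepR, PySem.List.pyGetD_zero, hread, cntR]
      by_cases hc : a.getD 0 0 < R
      · cases hb : bTL.getD 0 false <;> simp_all [List.getD]
      · simp only [List.getD] at hc ⊢
        rw [if_neg hc, if_neg (fun h => absurd h.1 hc)]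
        simp
  | succ i ih =>
      intro ans R bT hlen hagree
      have hstep : (PySem.List.pyRange ((i+1 : Nat) : Int) (-1) (-1))
          = ((i+1 : Nat) : Int) :: PySem.List.pyRange (i : Nat) (-1) (-1) := by
        rw [PySem.List.pyRange_neg_one_cons (by push_cast; omega)]
        norm_num
      rw [hstep, List.foldl_cons]
      have hi' : i < a.length := by omega
      simp only [stepR, PySem.List.pyGetD_natCast, PySem.List.pySetD_natCast,
        hagree (i+1) (le_refl _)]
      by_cases hc : a.getD (i+1) 0 < R
      · rw [if_pos hc]
        cases hb : bTL.getD (i+1) false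
        · rw [if_neg (by simp)]
          rw [ih hi' (ans + 1) (a.getD (i+1) 0) (bT.set (i+1) true) (by simp [hlen])
            (fun j hj => by rw [getD_set_ne _ _ _ (by omega)]; exact hagree j (by omega))]
          have hcc : a.getD (i+1) 0 < R ∧ bTL.getD (i+1) false = false := ⟨hc, hb⟩
          simp only [cntR, if_pos hcc, if_pos hc]
          ring
        · rw [if_pos rfl]
          rw [ih hi' ans (a.getD (i+1) 0) bT hlen (fun j hj => hagree j (by omega))]
          have hcc : ¬(a.getD (i+1) 0 < R ∧ bTL.getD (i+1) false = false) := by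
            rintro ⟨-, h2⟩; rw [hb] at h2; simp at h2
          simp only [cntR, if_neg hcc, if_pos hc]
          ring
      · rw [if_neg hc]
        rw [ih hi' ans R bT hlen (fun j hj => hagree j (by omega))]
        simp only [cntR, if_neg hc]
        have hno : ¬(a.getD (i+1) 0 < R ∧ bTL.getD (i+1) false = false) := fun h => hc h.1
        rw [if_neg hno]
        ring

theorem take_one_eq (a : List Int) (h : 0 < a.length) : a.take 1 = [a.getD 0 0] := by
  cases a with
  | nil => simp at h
  | cons x xs => simp [List.getD]

theorem take_one_eq_bool (l : List Bool) (h : 0 < l.length) : l.take 1 = [l.getD 0 false] := by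
  cases l with
  | nil => simp at h
  | cons x xs => simp [List.getD]

theorem take_succ_bool (l : List Bool) (n : Nat) (h : n < l.length) :
    l.take (n+1) = l.take n ++ [l.getD n false] := by
  rw [List.take_add_one, List.getElem?_eq_getElem h]
  simp [List.getD, List.getElem?_eq_getElem h]

theorem cntR_eq (a : List Int) (bTL : List Bool) (hb : bTL.length = a.length) (i : Nat)
    (hi : i < a.length) : ∀ (R : Int),
    cntR a bTL i R
      = ((List.zip (flagsB R ((a.take (i+1)).reverse)) ((bTL.take (i+1)).reverse)).countP
          (fun p => p.1 && !p.2) : Int) := by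
  induction i with
  | zero =>
      intro R
      rw [take_one_eq a (by omega), take_one_eq_bool bTL (by omega)]
      simp only [List.reverse_singleton, flagsB, List.zip_cons_cons, List.zip_nil_right,
        List.countP_cons, List.countP_nil, cntR]
      by_cases hc : a.getD 0 0 < R <;> cases hm : bTL.getD 0 false <;> simp
  | succ i ih =>
      intro R
      have h1 : a.take (i+2) = a.take (i+1) ++ [a.getD (i+1) 0] := by
        have := take_drop_succ a 0 (i+1) (by omega)
        simpa using this
      have h2 : bTL.take (i+2) = bTL.take (i+1) ++ [bTL.getD (i+1) false] := by
        exact take_succ_bool bTL (i+1) (by omega)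
      rw [h1, h2, List.reverse_append, List.reverse_append]
      simp only [List.reverse_singleton, List.singleton_append, flagsB, List.zip_cons_cons,
        List.countP_cons, cntR]
      rw [ih (by omega)]
      by_cases hc : a.getD (i+1) 0 < R <;> cases hm : bTL.getD (i+1) false <;>
        simp [hc, hm] <;> ring

-- ---- bridge from the flag/zip characterisation of A to B's per-index min tests ----

theorem runMin_eq_foldl_min (L : Int) (ys : List Int) : runMin L ys = ys.foldl min L := by
  induction ys generalizing L with
  | nil => rfl
  | cons x xs ih =>
      simp only [runMin, List.foldl_cons] at *
      rw [ih]
      congr 1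
      by_cases h : x < L <;> simp [min_def] <;> omega

theorem foldl_min_comm (ys : List Int) (b z : Int) :
    ys.foldl min (min b z) = min (ys.foldl min b) z := by
  induction ys generalizing b with
  | nil => rfl
  | cons x xs ih =>
      simp only [List.foldl_cons]
      rw [show min (min b z) x = min (min b x) z by
        rw [min_assoc, min_comm z x, ← min_assoc], ih]

-- min of a nonempty snoc with seed = the snoc'd element
theorem minB_append (l : List Int) (z : Int) :
    (PySem.List.min? (l ++ [z]) (fun x => x)).getD 0 = runMin z l := by
  cases l with
  | nil => simp [PySem.List.min?_id_cons, runMin]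
  | cons x xs =>
      rw [List.cons_append, PySem.List.min?_id_cons, runMin_eq_foldl_min]
      simp only [Option.getD_some, List.foldl_append, List.foldl_cons, List.foldl_nil]
      rw [show min z x = min x z from min_comm z x, foldl_min_comm]

theorem minB_cons (x : Int) (l : List Int) :
    (PySem.List.min? (x :: l) (fun y => y)).getD 0 = runMin x l := by
  rw [PySem.List.min?_id_cons, runMin_eq_foldl_min]; rfl

-- left flags, element by element
theorem flagsB_getD (m : Int) (xs : List Int) (t : Nat) (ht : t < xs.length) :
    (flagsB m xs).getD t false = decide (xs.getD t 0 < runMin m (xs.take t)) := by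
  induction xs generalizing m t with
  | nil => simp at ht
  | cons x l ih =>
      cases t with
      | zero => simp [flagsB, List.getD, runMin]
      | succ t =>
          simp only [flagsB, List.getD_cons_succ, List.take_succ_cons, List.getD_cons_succ]
          rw [ih _ t (by simpa using ht)]
          rfl

-- right flags, read back in original order
theorem flagsB_rev_getD (m : Int) (xs : List Int) (i : Nat) (hi : i < xs.length) :
    (flagsB m xs.reverse).reverse.getD i false
      = decide (xs.getD i 0 < runMin m (xs.drop (i+1))) := by
  induction xs using List.reverseRecOn generalizing m with
  | nil => simp at hi
  | append_singleton ys z ih =>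
      rw [List.reverse_append, List.reverse_singleton, List.singleton_append]
      simp only [flagsB, List.reverse_cons]
      by_cases hl : i < ys.length
      · have hlen2 : ((flagsB (if z < m then z else m) ys.reverse).reverse).length
            = ys.length := by
          rw [List.length_reverse, flagsB_length, List.length_reverse]
        rw [getD_append_bool _ _ _ (Or.inl (by rw [hlen2]; omega))]
        rw [ih _ hl]
        have he : (ys ++ [z]).getD i 0 = ys.getD i 0 := by
          simp [List.getD, List.getElem?_append_left hl]
        have hd : (ys ++ [z]).drop (i+1) = ys.drop (i+1) ++ [z] := by
          rw [List.drop_append_of_le_length (by omega)]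
        rw [he, hd]
        congr 1
        rw [runMin_eq_foldl_min, runMin_eq_foldl_min, List.foldl_append]
        simp only [List.foldl_cons, List.foldl_nil]
        rw [show (if z < m then z else m) = min m z by
          by_cases h : z < m <;> simp [min_def] <;> omega, foldl_min_comm]
      · have hie : i = ys.length := by simp at hi; omega
        subst hie
        have hlen : ((flagsB (if z < m then z else m) ys.reverse).reverse).length
            = ys.length := by
          rw [List.length_reverse, flagsB_length, List.length_reverse]
        rw [← hlen, getD_append_self, hlen]
        have he : (ys ++ [z]).getD ys.length 0 = z := by
          simp [List.getD]
        have hd : (ys ++ [z]).drop (ys.length + 1) = [] := by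
          apply List.drop_eq_nil_of_le; simp
        rw [he, hd]
        simp [runMin]

-- zip-or count over equal-length boolean lists = indexwise count over range
theorem zip_or_count (xs : List Bool) : ∀ (ys : List Bool), xs.length = ys.length →
    (List.zip xs ys).countP (fun p => p.1 || p.2)
      = (List.range xs.length).countP (fun i => xs.getD i false || ys.getD i false) := by
  induction xs with
  | nil => intro ys h; simp
  | cons x xt ih =>
      intro ys h
      cases ys with
      | nil => simp at h
      | cons y yt =>
          simp only [List.zip_cons_cons, List.countP_cons, List.length_cons,
            List.range_succ_eq_map, List.countP_map]
          rw [ih yt (by simpa using h)]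
          simp [Function.comp_def]

theorem countP_congr_range (n : Nat) (p q : Nat → Bool) (h : ∀ i, i < n → p i = q i) :
    (List.range n).countP p = (List.range n).countP q := by
  apply List.countP_congr
  intro i hi
  rw [h i (List.mem_range.mp hi)]

theorem foldl_count_range (p : Nat → Bool) (l : List Nat) : ∀ (c : Int),
    l.foldl (fun c i => if p i then c + 1 else c) c = c + (l.countP p : Int) := by
  induction l with
  | nil => intro c; simp
  | cons x xs ih =>
      intro c
      simp only [List.foldl_cons, List.countP_cons]
      rw [ih]
      by_cases h : p x <;> simp [h] <;> push_cast <;> ring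

theorem countP_zip_or (xs ys : List Bool) (h : xs.length = ys.length) :
    ((List.zip xs ys).countP (fun p => p.1 || p.2) : Int)
      = (xs.countP id : Int) + ((List.zip ys xs).countP (fun p => p.1 && !p.2) : Int) := by
  induction xs generalizing ys with
  | nil => cases ys <;> simp
  | cons x xs ih =>
      cases ys with
      | nil => simp at h
      | cons y ys =>
          simp only [List.zip_cons_cons, List.countP_cons]
          push_cast
          rw [ih ys (by simpa using h)]
          cases x <;> cases y <;> simp <;> ring

theorem main_eq (a : List Int) (hpre : a ≠ []) : solution a = solution_alt a := by
  have hn : 1 ≤ a.length := List.length_pos_of_ne_nil hpre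
  have hlastD : PySem.List.pyGetD a (-1) 0 = a.getD (a.length - 1) 0 := by
    rw [PySem.List.pyGetD_neg_one a 0 hpre, List.getLast_eq_getElem,
      List.getD_eq_getElem _ _ (by omega)]
  by_cases h2 : 2 ≤ a.length
  case neg =>
    obtain ⟨x, hx⟩ : ∃ x, a = [x] := by
      cases a with
      | nil => simp at hn
      | cons y ys => cases ys with
        | nil => exact ⟨y, rfl⟩
        | cons z zs => simp at h2
    subst hx
    simp only [solution, solution_alt, List.length_cons, List.length_nil]
    norm_num
    rw [PySem.List.pyRange_neg_one_cons (by norm_num),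
      PySem.List.pyRange_neg_one_eq_nil (by norm_num)]
    simp [stepR, PySem.List.pyGetD_zero, List.getD, hlastD]
  case pos =>
    simp only [solution, solution_alt]
    set L0 := PySem.List.pyGetD a 0 0 with hL0
    set R0 := PySem.List.pyGetD a (-1) 0 with hR0
    have hc2 : ((a.length : Int) - 1) = ((a.length - 1 : Nat) : Int) := by push_cast; omega
    have hle1 : ((a.length : Int) - 1) = (((1 + (a.length - 2) : Nat)) : Int) := by
      push_cast; omega
    have hleft : PySem.List.pyRange 1 ((a.length : Int) - 1) 1
        = PySem.List.pyRange (((1:Nat)) : Int) (((1 + (a.length - 2) : Nat)) : Int) 1 := by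
      rw [hle1]; norm_num
    have hright : PySem.List.pyRange ((a.length : Int) - 1) (-1) (-1)
        = PySem.List.pyRange (((a.length - 1 : Nat)) : Int) (-1) (-1) := by rw [hc2]
    rw [hleft, hright]
    set seg := (a.drop 1).take (a.length - 2) with hseg
    set lf := flagsB L0 seg with hlf
    set rv := flagsB R0 ((a.take (a.length - 1)).reverse) with hrv
    obtain ⟨h1, -, h3, h4⟩ := leftFold a 1 (a.length - 2) (by omega) 2 L0
      (List.replicate a.length false) (by simp)
    set s1 := (PySem.List.pyRange (((1:Nat)) : Int) (((1 + (a.length - 2) : Nat)) : Int) 1).foldl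
      (stepL a) (2, List.replicate a.length false, L0) with hs1
    set bTL := s1.2.1 with hbTL
    have hblen : bTL.length = a.length := by rw [hbTL, h3]; simp
    rw [rightFold a bTL (a.length - 1) (by omega) s1.1 R0 bTL hblen (fun j _ => rfl)]
    have hstep1 : cntR a bTL (a.length - 1) R0 = cntR a bTL (a.length - 2) R0 := by
      have he : a.length - 1 = (a.length - 2) + 1 := by omega
      rw [he]
      show (if a.getD (a.length - 2 + 1) 0 < R0 ∧ _ then (1:Int) else 0) + _ = _
      have he2 : a.length - 2 + 1 = a.length - 1 := by omega
      rw [he2, hlastD]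
      simp
    have hlflen : lf.length = a.length - 2 := by
      rw [hlf, flagsB_length, hseg]; simp; omega
    have hmask : bTL.take (a.length - 1) = false :: lf := by
      apply List.ext_getElem
      · simp [hblen, hlflen]; omega
      · intro j hj1 hj2
        have hjn : j < a.length - 1 := by simpa [hblen] using hj1
        have hgd : bTL.getD j false = (false :: lf).getD j false := by
          rw [hbTL, h4 j]
          cases j with
          | zero => simp [List.getD]
          | succ t =>
              have h1t : (1:Nat) ≤ t + 1 := by omega
              have hrep : (List.replicate a.length false).getD (t+1) false = false := by
                simp [List.getD]
              rw [hrep]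
              simp [List.getD, h1t, hlf, hseg]
        have e1 : (bTL.take (a.length - 1))[j] = bTL.getD j false := by
          rw [List.getElem_take, List.getD_eq_getElem _ _ (by omega)]
        have e2 : (false :: lf)[j]'hj2 = (false :: lf).getD j false := by
          rw [List.getD_eq_getElem _ _ (by simpa using hj2)]
        rw [e1, e2, hgd]
    have hrvlen : rv.length = a.length - 1 := by
      rw [hrv, flagsB_length]; simp; try omega
    rw [hstep1, h1, cntR_eq a bTL hblen (a.length - 2) (by omega) R0,
      show a.length - 2 + 1 = a.length - 1 by omega, hmask]
    rw [← hrv, ← hlf]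
    -- A's total = 2 + count of the indexwise or of the two flag lists
    have hzip : rv.reverse.zip (false :: lf) = (rv.zip (false :: lf).reverse).reverse := by
      have hz := List.reverse_zipWith (f := Prod.mk (α := Bool) (β := Bool)) (l := rv)
        (l' := (false :: lf).reverse) (by simp [hrvlen, hlflen]; omega)
      rw [List.reverse_reverse] at hz
      exact hz.symm
    have hA : 2 + (↑(List.countP id lf) : Int)
          + ((rv.zip (false :: lf).reverse).countP (fun p => p.1 && !p.2) : Int)
        = 2 + (((false :: lf).zip rv.reverse).countP (fun p => p.1 || p.2) : Int) := by
      rw [countP_zip_or (false :: lf) rv.reverse (by simp [hlflen, hrvlen]; omega), hzip,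
        List.countP_reverse]
      simp
      ring
    rw [show (2:Int) + ↑(List.countP id lf) + _ = _ from hA]
    -- now convert the zip count into B's per-index count
    rw [zip_or_count (false :: lf) rv.reverse (by simp [hlflen, hrvlen]; omega)]
    have hlen1 : (false :: lf).length = a.length - 1 := by simp [hlflen]; omega
    rw [hlen1]
    rw [foldl_count_range (condB a) (List.range (a.length - 1)) 0]
    rw [countP_congr_range (a.length - 1) _ (condB a) ?_]
    · simp
    intro i hi
    have hL0' : L0 = a.getD 0 0 := by rw [hL0, PySem.List.pyGetD_zero]
    have hlfget : ∀ t, t < a.length - 2 →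
        lf.getD t false = decide (a.getD (t+1) 0
          < (PySem.List.min? (a.take (t+1)) (fun x => x)).getD 0) := by
      intro t ht
      rw [hlf, flagsB_getD _ _ t (by rw [hseg]; simp; omega)]
      have hsg : seg.getD t 0 = a.getD (t+1) 0 := by
        rw [hseg]
        simp [List.getD, List.getElem?_take_of_lt ht]
      have hst : seg.take t = (a.drop 1).take t := by
        rw [hseg, List.take_take]
        congr 1; omega
      have hcons : a.take (t+1) = a.getD 0 0 :: (a.drop 1).take t := by
        cases a with
        | nil => simp at hn
        | cons x xs => simp [List.getD]
      rw [hsg, hst, hcons, minB_cons, hL0']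
    have hrvget : rv.reverse.getD i false = decide (a.getD i 0
        < (PySem.List.min? (a.drop (i+1)) (fun x => x)).getD 0) := by
      rw [hrv]
      have := flagsB_rev_getD R0 (a.take (a.length - 1)) i (by simp; omega)
      rw [this]
      have he : (a.take (a.length - 1)).getD i 0 = a.getD i 0 := by
        simp [List.getD, List.getElem?_take_of_lt hi]
      have hd : a.drop (i+1) = (a.take (a.length - 1)).drop (i+1) ++ [a.getD (a.length - 1) 0] := by
        have hsp : a = a.take (a.length - 1) ++ [a.getD (a.length - 1) 0] := by
          conv_lhs => rw [← List.take_append_drop (a.length - 1) a]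
          congr 1
          have : a.drop (a.length - 1) = (a.drop (a.length - 1)).take 1 := by
            rw [List.take_of_length_le]; simp; omega
          rw [this, take_drop_succ a (a.length - 1) 0 (by omega)]
          simp
        conv_lhs => rw [hsp]
        rw [List.drop_append_of_le_length (by simp; omega)]
      rw [he, hd, minB_append, hlastD]
    rw [hrvget]
    cases i with
    | zero =>
        simp [condB, List.getD]
    | succ t =>
        have hlt : t < a.length - 2 := by omega
        have hg := hlfget t hlt
        simp only [List.getD] at hg
        simp [condB, List.getD, hg]

-- ===== VERDICT (by name: the statement is the Claim_ definition above) =====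
theorem solution_spec : Claim_equal_solution := by
  intro a _ hpre
  exact main_eq a hpre
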